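-- pv_equiv track=rewrite | github.com/xl0418/Tensorflow | MMSEG.py | maxLengthFilter
-- ===== SOURCE A (Python) =====
-- def maxLengthFilter(chunks):
--     """
--     规则1：取最大长度匹配的chunk,即chunk中各词的长度之和取最大的chunk
--     :param chunks:
--     :return:
--     """
--     chunks_dict = {}
--     for chunk in chunks:
--         words_length = sum([(end - begin + 1) for begin, end in chunk])  # 词的长度
--         if words_length in chunks_dict:
--             chunks_dict[words_length].append(chunk)
--         else:
--             chunks_dict[words_length] = [chunk]
--     chunks_dict_sorted = sorted(chunks_dict.items(), key=lambda x: x[0], reverse=True)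
--     filted_chunks = chunks_dict_sorted[0][1]  # 取最长的chunks
--     return filted_chunks
-- ===== SOURCE B (Python) =====
-- def maxLengthFilter(chunks):
--     ordered = sorted(chunks, key=lambda c: sum(end - begin + 1 for begin, end in c), reverse=True)
--     best = sum(end - begin + 1 for begin, end in ordered[0])
--     return [c for c in ordered if sum(end - begin + 1 for begin, end in c) == best]
-- ===== Notes on version B (the rewrite author's own statement) =====
-- stated objective: simpler
-- what changed: B drops A's length-keyed grouping dict entirely: it stably sorts the chunks by total word length descending, reads the best total off the first element, and filters the sorted list, which preserves A's output order exactly.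
import Mathlib
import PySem

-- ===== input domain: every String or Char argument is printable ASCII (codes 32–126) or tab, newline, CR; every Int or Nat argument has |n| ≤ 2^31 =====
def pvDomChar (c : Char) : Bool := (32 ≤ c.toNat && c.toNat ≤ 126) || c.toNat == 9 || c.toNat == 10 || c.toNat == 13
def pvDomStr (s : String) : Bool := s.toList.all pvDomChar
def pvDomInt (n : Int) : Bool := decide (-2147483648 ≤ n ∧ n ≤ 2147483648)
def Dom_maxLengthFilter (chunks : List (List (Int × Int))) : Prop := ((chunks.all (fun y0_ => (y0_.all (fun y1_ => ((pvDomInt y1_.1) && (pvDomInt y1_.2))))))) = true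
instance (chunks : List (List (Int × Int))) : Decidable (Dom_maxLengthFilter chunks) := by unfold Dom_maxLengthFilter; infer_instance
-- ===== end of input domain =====

-- B replaces A's length-keyed grouping dict by a stable descending sort plus a filter (objective: simpler).


-- sum([(end - begin + 1) for begin, end in chunk]) — used verbatim by both Pythons
def pvTotal (chunk : List (Int × Int)) : Int := (chunk.map (fun p => p.2 - p.1 + 1)).sum

-- ===== PORT A =====
def maxLengthFilter (chunks : List (List (Int × Int))) : List (List (Int × Int)) :=
  let chunksDict := chunks.foldl (fun d chunk =>
      let wordsLength := pvTotal chunk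
      if d.contains wordsLength then d.modify wordsLength [] (fun l => l ++ [chunk])
      else d.insert wordsLength [chunk]) PySem.Dict.empty
  let chunksDictSorted := PySem.List.sorted chunksDict.items (fun x => x.1) true
  match chunksDictSorted with
  | [] => []            -- Python raises IndexError here (chunks_dict_sorted[0]); excluded by Pre_
  | p :: _ => p.2

-- ===== PORT B =====
def maxLengthFilter_alt (chunks : List (List (Int × Int))) : List (List (Int × Int)) :=
  let ordered := PySem.List.sorted chunks pvTotal true
  match ordered with
  | [] => []            -- Python raises IndexError here (ordered[0]); excluded by Pre_
  | m :: _ =>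
    let best := pvTotal m
    ordered.filter (fun c => pvTotal c == best)

-- ===== PRECONDITION & SPEC =====
-- A raises IndexError on the empty list (chunks_dict_sorted[0]); B raises there too (ordered[0]).
def Pre_maxLengthFilter (chunks : List (List (Int × Int))) : Prop := chunks ≠ []
instance (chunks : List (List (Int × Int))) : Decidable (Pre_maxLengthFilter chunks) := by unfold Pre_maxLengthFilter; infer_instance
def pvWitness_maxLengthFilter : (List (List (Int × Int))) := [[(0, 2)], [(0, 0), (1, 1)], [(0, 1)]]

def Spec_maxLengthFilter (chunks : List (List (Int × Int))) (out : List (List (Int × Int))) : Prop := out = maxLengthFilter_alt chunks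
instance (chunks : List (List (Int × Int))) (out : List (List (Int × Int))) : Decidable (Spec_maxLengthFilter chunks out) := by unfold Spec_maxLengthFilter; infer_instance

-- ===== CLAIM (what is proved, stated in full; the proofs are below) =====
def Claim_equal_maxLengthFilter : Prop := ∀ (chunks : List (List (Int × Int))), Dom_maxLengthFilter chunks → Pre_maxLengthFilter chunks → Spec_maxLengthFilter chunks (maxLengthFilter chunks)

-- ===== LEMMAS AND PROOFS =====

-- inserting an element whose key is not k does not change the key-k filter
theorem filter_insertBy_of_ne {α : Type} (key : α → Int) (k : Int) (x : α) (ys : List α)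
    (hx : ¬ key x = k) (bef : α → α → Bool) :
    (PySem.List.insertBy bef x ys).filter (fun c => key c == k) = ys.filter (fun c => key c == k) := by
  induction ys with
  | nil => simp [PySem.List.insertBy, hx]
  | cons y ys ih =>
    simp only [PySem.List.insertBy]
    split
    · simp [hx]
    · simp only [List.filter_cons, ih]

-- stable descending insertion of a max-key element appends it to the key-k filter
theorem filter_insertBy_of_eq {α : Type} (key : α → Int) (k : Int) (x : α) (ys : List α)
    (hx : key x = k) (hs : ys.Pairwise (fun a b => key b ≤ key a)) :
    (PySem.List.insertBy (fun a b => decide (key b < key a)) x ys).filter (fun c => key c == k)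
      = ys.filter (fun c => key c == k) ++ [x] := by
  induction ys with
  | nil => simp [PySem.List.insertBy, hx]
  | cons y ys ih =>
    simp only [PySem.List.insertBy]
    rcases List.pairwise_cons.mp hs with ⟨hy, htl⟩
    split
    · rename_i hlt
      have hylt : key y < key x := of_decide_eq_true hlt
      have hyne : ¬ key y = k := by omega
      have : ys.filter (fun c => key c == k) = [] := by
        apply List.filter_eq_nil_iff.mpr
        intro c hc
        have := hy c hc
        simp only [beq_iff_eq]
        omega
      simp [hx, hyne, this]
    · simp only [List.filter_cons, ih htl]
      split <;> rfl

-- stability: filtering the key-k class commutes with the stable descending sort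
theorem filter_sorted_rev {α : Type} (key : α → Int) (k : Int) (xs : List α) :
    (PySem.List.sorted xs key true).filter (fun c => key c == k) = xs.filter (fun c => key c == k) := by
  induction xs using List.reverseRecOn with
  | nil => simp [PySem.List.sorted_rev_eq_foldl_insertBy]
  | append_singleton xs x ih =>
    have hstep : PySem.List.sorted (xs ++ [x]) key true
        = PySem.List.insertBy (fun a b => decide (key b < key a)) x (PySem.List.sorted xs key true) := by
      rw [PySem.List.sorted_rev_eq_foldl_insertBy, List.foldl_append,
        ← PySem.List.sorted_rev_eq_foldl_insertBy]
      rfl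
    by_cases hx : key x = k
    · rw [hstep, filter_insertBy_of_eq key k x _ hx (PySem.List.sorted_pairwise_rev xs key), ih]
      simp [hx]
    · rw [hstep, filter_insertBy_of_ne key k x _ hx, ih]
      simp [hx]

-- A's grouping loop is the canonical modify-append loop
theorem dictA_eq (chunks : List (List (Int × Int))) :
    chunks.foldl (fun d chunk =>
      let wordsLength := pvTotal chunk
      if d.contains wordsLength then d.modify wordsLength [] (fun l => l ++ [chunk])
      else d.insert wordsLength [chunk]) PySem.Dict.empty
    = chunks.foldl (fun d chunk => d.modify (pvTotal chunk) [] (fun l => l ++ [chunk])) PySem.Dict.empty := by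
  have hfun : (fun (d : PySem.Dict Int (List (List (Int × Int)))) chunk =>
      let wordsLength := pvTotal chunk
      if d.contains wordsLength then d.modify wordsLength [] (fun l => l ++ [chunk])
      else d.insert wordsLength [chunk])
      = (fun d chunk => d.modify (pvTotal chunk) [] (fun l => l ++ [chunk])) := by
    funext d chunk
    by_cases h : d.contains (pvTotal chunk) = true
    · simp [h]
    · have hf : d.contains (pvTotal chunk) = false := by simpa using h
      simp [hf, PySem.Dict.modify, PySem.Dict.getD_of_not_contains d _ hf]
  rw [hfun]

-- value stored under key k = the key-k filter of chunks
theorem dictA_getD (chunks : List (List (Int × Int))) (k : Int) :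
    (chunks.foldl (fun d chunk => d.modify (pvTotal chunk) [] (fun l => l ++ [chunk])) PySem.Dict.empty).getD k []
      = chunks.filter (fun c => pvTotal c == k) := by
  have hmap : chunks.foldl (fun d chunk => d.modify (pvTotal chunk) [] (fun l => l ++ [chunk])) PySem.Dict.empty
      = (chunks.map (fun c => (pvTotal c, c))).foldl (fun d p => d.modify p.1 [] (fun l => l ++ [p.2])) PySem.Dict.empty := by
    rw [List.foldl_map]
  rw [hmap, PySem.Dict.getD_foldl_modify_append]
  simp [List.filter_map, Function.comp_def]

theorem dictA_keys (chunks : List (List (Int × Int))) :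
    (chunks.foldl (fun d chunk => d.modify (pvTotal chunk) [] (fun l => l ++ [chunk])) PySem.Dict.empty).keys
      = PySem.Set.ofList (chunks.map pvTotal) := by
  rw [PySem.Dict.keys_foldl_modify_key chunks pvTotal [] (fun _ chunk => fun l => l ++ [chunk])]
  simp [PySem.Dict.keys_empty, PySem.Set.update_eq_append_filter, PySem.Set.contains]

theorem dictA_keys_nodup (chunks : List (List (Int × Int))) :
    (chunks.foldl (fun d chunk => d.modify (pvTotal chunk) [] (fun l => l ++ [chunk])) PySem.Dict.empty).keys.Nodup := by
  apply PySem.Dict.nodup_keys_foldl_modify_key chunks pvTotal [] (fun _ chunk => fun l => l ++ [chunk])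
  simp [PySem.Dict.keys_empty]

-- ===== VERDICT (by name: the statement is the Claim_ definition above) =====
theorem maxLengthFilter_spec : Claim_equal_maxLengthFilter := by
  intro chunks _ hpre
  unfold Spec_maxLengthFilter maxLengthFilter maxLengthFilter_alt
  simp only [dictA_eq]
  set d := chunks.foldl (fun d chunk => d.modify (pvTotal chunk) [] (fun l => l ++ [chunk])) PySem.Dict.empty with hd
  -- B's side: nonempty sorted list
  have hBne : PySem.List.sorted chunks pvTotal true ≠ [] := by
    simpa [PySem.List.sorted_eq_nil_iff] using hpre
  obtain ⟨m, t, hB⟩ := List.exists_cons_of_ne_nil hBne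
  -- A's side: nonempty sorted items
  have hkeys := dictA_keys chunks
  have hnodup := dictA_keys_nodup chunks
  have hItemsNe : d.items ≠ [] := by
    intro h
    have : d.keys = [] := by simp [PySem.Dict.keys, h]
    rw [hkeys] at this
    rcases List.exists_cons_of_ne_nil hpre with ⟨c, cs, rfl⟩
    simp [PySem.Set.ofList_cons] at this
  have hAne : PySem.List.sorted d.items (fun x => x.1) true ≠ [] := by
    simpa [PySem.List.sorted_eq_nil_iff] using hItemsNe
  obtain ⟨q, s, hA⟩ := List.exists_cons_of_ne_nil hAne
  rw [hA, hB]
  simp only []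
  -- q's key and pvTotal m are both the maximum total, hence equal
  have hqmem : q ∈ d.items := by
    have := (PySem.List.mem_sorted (xs := d.items) (key := fun x => x.1) (rev := true) (x := q)).mp
    exact this (hA ▸ List.mem_cons_self)
  have hqkey : q.1 ∈ chunks.map pvTotal := by
    have : q.1 ∈ d.keys := PySem.Dict.mem_keys_of_mem_items d hqmem
    rw [hkeys] at this
    exact (PySem.Set.mem_ofList _ _).mp this
  obtain ⟨c0, hc0mem, hc0⟩ := List.mem_map.mp hqkey
  have hmmem : m ∈ chunks := by
    have := (PySem.List.mem_sorted (xs := chunks) (key := pvTotal) (rev := true) (x := m)).mp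
    exact this (hB ▸ List.mem_cons_self)
  have hmax_m : ∀ c ∈ chunks, pvTotal c ≤ pvTotal m :=
    PySem.List.key_head_sorted_rev_ge chunks pvTotal hB
  have hmax_q : ∀ y ∈ d.items, y.1 ≤ q.1 :=
    PySem.List.key_head_sorted_rev_ge d.items (fun x => x.1) hA
  have hle1 : q.1 ≤ pvTotal m := hc0 ▸ hmax_m c0 hc0mem
  have hle2 : pvTotal m ≤ q.1 := by
    have hmem : pvTotal m ∈ d.keys := by
      rw [hkeys]
      exact (PySem.Set.mem_ofList _ _).mpr (List.mem_map_of_mem hmmem)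
    obtain ⟨v, hv⟩ := List.mem_map.mp hmem
    exact hv.2 ▸ hmax_q v hv.1
  have hk : q.1 = pvTotal m := le_antisymm hle1 hle2
  -- A returns the stored group; B returns the stable filter
  have hq2 : q.2 = chunks.filter (fun c => pvTotal c == pvTotal m) := by
    have hgd := PySem.Dict.getD_of_mem_items d (k := q.1) (v := q.2) (by simpa using hqmem) hnodup []
    rw [← hgd, hd, dictA_getD, hk]
  rw [hq2, ← hB]
  exact (filter_sorted_rev pvTotal (pvTotal m) chunks).symm
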